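-- pv_equiv track=rewrite | github.com/alpdemirci/mTSP | mTSP/mTSP.py | MTP
-- ===== SOURCE A (Python) =====
-- def create_veh_dict(vehicle):
--     """
--
--
--     Parameters
--     ----------
--     vehicle : [location1,location2] type(vehicle[i]) = int
--     Vehicles location in 1d array
--
--     Returns
--     -------
--     d : Dictionary
--     {i : location..}
--
--     Description
--     -------
--     Bu fonksiyon araçlara sırasıyla etiketlendirip başlangıç noktalarını tutan
--     bir dictionary üretmektedir.
--     """
--     d = {}
--     for i, e in enumerate(vehicle):
--         d[str(i+1)] = [e]
--     return d
--
-- def MTP(araç, teslim, matrix, service_dict):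
--     """
--
--
--     Parameters
--     ----------
--     araç : [location1,location2] type(araç[i]) = int
--     teslim : [destination1,destination2] type(teslim[i]) = int
--     matrix :  2d array
--     service_dict : Description
--
--     Returns
--     -------
--     d : Dictionary
--     dist_dict : Dictionary
--
--     """
--     d = create_veh_dict(araç)
--     for e in teslim:
--         distance = float("inf")
--         for veh in d:
--             son_nokta = d[veh][-1]
--             dist = matrix[son_nokta][e] + service_dict[e]
--             if dist < distance:
--                 araba = veh
--                 distance = dist
--         d[araba].append(e)
--     dist_dict = vehicle_and_distance(d, matrix, service_dict)
--     return d, dist_dict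
--
-- def vehicle_and_distance(dic, matrix, service_dict):
--     """
--
--
--     Parameters
--     ----------
--     dic : Dictionary
--     matrix : 2d array
--     service_dict : Dictionary
--
--     Returns
--     -------
--     distance : Dictionary
--
--     """
--     distance = {}
--     for e in dic:
--         sum_way = 0
--         destination = dic[e]
--         for i in range(len(destination)-1):
--             start, end = destination[i], destination[i+1]
--             sum_way += matrix[start][end] + service_dict[end]
--         distance[e] = sum_way
--     return distance
-- ===== SOURCE B (Python) =====
-- def MTP(araç, teslim, matrix, service_dict):
--     # Fused single pass: distances are accumulated incrementally while assigning
--     # (the chosen minimum IS the route-extension cost), instead of recomputing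
--     # every route in a separate vehicle_and_distance traversal.
--     d = {}
--     dist_dict = {}
--     for i, e in enumerate(araç):
--         key = str(i + 1)
--         d[key] = [e]
--         dist_dict[key] = 0
--     for e in teslim:
--         distance = float("inf")
--         for veh in d:
--             son_nokta = d[veh][-1]
--             dist = matrix[son_nokta][e] + service_dict[e]
--             if dist < distance:
--                 araba = veh
--                 distance = dist
--         d[araba].append(e)
--         dist_dict[araba] += distance
--     return d, dist_dict
-- ===== Notes on version B (the rewrite author's own statement) =====
-- stated objective: simpler
-- what changed: B fuses assignment and distance computation into one pass: it initializes a zero distance per vehicle and adds the chosen minimum (which equals the route-extension cost) when a delivery is assigned, eliminating the create_veh_dict/vehicle_and_distance helpers and the whole second traversal that recomputes every route edge by edge.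
import Mathlib
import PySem

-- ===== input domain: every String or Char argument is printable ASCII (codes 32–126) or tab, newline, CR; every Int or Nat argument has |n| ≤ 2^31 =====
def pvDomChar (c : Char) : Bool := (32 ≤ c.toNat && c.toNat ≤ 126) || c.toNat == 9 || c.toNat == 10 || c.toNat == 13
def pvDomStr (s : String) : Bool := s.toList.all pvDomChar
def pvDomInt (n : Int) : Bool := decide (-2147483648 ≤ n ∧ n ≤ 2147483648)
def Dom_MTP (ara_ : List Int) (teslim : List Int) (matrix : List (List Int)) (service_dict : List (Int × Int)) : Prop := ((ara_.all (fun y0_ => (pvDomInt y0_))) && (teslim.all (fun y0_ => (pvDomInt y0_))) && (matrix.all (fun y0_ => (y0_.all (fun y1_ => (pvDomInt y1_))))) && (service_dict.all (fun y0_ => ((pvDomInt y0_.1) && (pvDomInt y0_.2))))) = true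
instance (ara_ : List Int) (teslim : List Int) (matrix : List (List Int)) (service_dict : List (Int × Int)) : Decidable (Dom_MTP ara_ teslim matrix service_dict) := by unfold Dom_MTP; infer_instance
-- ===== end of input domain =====

-- B fuses assignment and distance bookkeeping into one pass (the chosen minimum IS the
-- route-extension cost), dropping A's separate vehicle_and_distance recomputation; same results.
-- (A mutates nothing observable; equivalence is about the returned pair.)

-- ===== PORT A =====
-- d[veh][-1] ; getD 0 is never used on admitted inputs (routes are nonempty)
def lastP (r : List Int) : Int := (PySem.List.pyGet? r (-1)).getD 0

-- matrix[start][e] + service_dict[e] ; the getD defaults stand for IndexError/KeyError, excluded by Pre_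
def edgeCost (matrix : List (List Int)) (sd : PySem.Dict Int Int) (start e : Int) : Int :=
  (PySem.List.pyGet? ((PySem.List.pyGet? matrix start).getD []) e).getD 0 + (sd.get? e).getD 0

def createVehDict (vehicle : List Int) : PySem.Dict String (List Int) :=
  (PySem.List.enumerate vehicle).foldl
    (fun d ie => d.insert (PySem.Int.toStr (ie.1 + 1)) [ie.2]) PySem.Dict.empty

-- the inner 'for veh in d' argmin loop (textually identical in A and in B); state =
-- (araba?, distance?) with none = "unassigned"/float('inf'); (none, none) at the end = NameError, excluded by Pre_
def chooseVeh (d : PySem.Dict String (List Int)) (matrix : List (List Int))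
    (sd : PySem.Dict Int Int) (e : Int) : Option String × Option Int :=
  d.keys.foldl
    (fun st veh =>
      let dist := edgeCost matrix sd (lastP ((d.get? veh).getD [])) e
      match st.2 with
      | none => (some veh, some dist)
      | some dv => if dist < dv then (some veh, some dist) else st)
    (none, none)

def routeSum (matrix : List (List Int)) (sd : PySem.Dict Int Int) (destination : List Int) : Int :=
  (PySem.List.pyRange 0 ((destination.length : Int) - 1)).foldl
    (fun sum_way i =>
      sum_way + edgeCost matrix sd ((PySem.List.pyGet? destination i).getD 0)
        ((PySem.List.pyGet? destination (i + 1)).getD 0)) 0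

def vehicleAndDistance (dic : PySem.Dict String (List Int)) (matrix : List (List Int))
    (sd : PySem.Dict Int Int) : PySem.Dict String Int :=
  dic.keys.foldl (fun distance e => distance.insert e (routeSum matrix sd ((dic.get? e).getD []))) PySem.Dict.empty

def MTP (ara_ : List Int) (teslim : List Int) (matrix : List (List Int)) (service_dict : List (Int × Int)) : (List (String × List Int)) × (List (String × Int)) :=
  let sd := PySem.Dict.ofList service_dict
  let d := teslim.foldl
    (fun d e =>
      match (chooseVeh d matrix sd e).1 with
      | some araba => d.modify araba [] (fun r => r ++ [e])
      | none => d)                                   -- Python: NameError, excluded by Pre_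
    (createVehDict ara_)
  (d.items, (vehicleAndDistance d matrix sd).items)

-- ===== PORT B =====
def MTP_alt (ara_ : List Int) (teslim : List Int) (matrix : List (List Int)) (service_dict : List (Int × Int)) : (List (String × List Int)) × (List (String × Int)) :=
  let sd := PySem.Dict.ofList service_dict
  let init := (PySem.List.enumerate ara_).foldl
    (fun (p : PySem.Dict String (List Int) × PySem.Dict String Int) ie =>
      let key := PySem.Int.toStr (ie.1 + 1)
      (p.1.insert key [ie.2], p.2.insert key 0))
    (PySem.Dict.empty, PySem.Dict.empty)
  let fin := teslim.foldl
    (fun (p : PySem.Dict String (List Int) × PySem.Dict String Int) e =>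
      match chooseVeh p.1 matrix sd e with
      | (some araba, some distance) =>
          (p.1.modify araba [] (fun r => r ++ [e]), p.2.modify araba 0 (fun s => s + distance))
      | _ => p)                                      -- Python: NameError, excluded by Pre_
    init
  (fin.1.items, fin.2.items)

-- ===== PRECONDITION & SPEC =====
-- Pre_ excludes inputs where Python A raises: a delivery with no vehicles (NameError), a failing
-- service_dict lookup (KeyError) or matrix indexing (IndexError). Since the set of waypoint pairs the
-- greedy actually visits depends on its own choices, Pre_ over-approximates it in closed form: it asks
-- matrix[p][e] to exist for EVERY p in araç++teslim and EVERY delivery e, which excludes some inputs A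
-- happens to return on (rows for never-visited pairs missing).
def Pre_MTP (ara_ : List Int) (teslim : List Int) (matrix : List (List Int)) (service_dict : List (Int × Int)) : Prop :=
  (teslim ≠ [] → ara_ ≠ []) ∧
  ∀ e ∈ teslim,
    ((PySem.Dict.ofList service_dict).get? e).isSome = true ∧
    ∀ p ∈ ara_ ++ teslim,
      (PySem.List.pyGet? matrix p).isSome = true ∧
      (PySem.List.pyGet? ((PySem.List.pyGet? matrix p).getD []) e).isSome = true
instance (ara_ : List Int) (teslim : List Int) (matrix : List (List Int)) (service_dict : List (Int × Int)) : Decidable (Pre_MTP ara_ teslim matrix service_dict) := by unfold Pre_MTP; infer_instance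

def pvWitness_MTP : List Int × List Int × List (List Int) × (List (Int × Int)) :=
  ([0], [1], [[0, 1], [3, 0]], [(1, 2)])

def Spec_MTP (ara_ : List Int) (teslim : List Int) (matrix : List (List Int)) (service_dict : List (Int × Int)) (out : (List (String × List Int)) × (List (String × Int))) : Prop := out = MTP_alt ara_ teslim matrix service_dict
instance (ara_ : List Int) (teslim : List Int) (matrix : List (List Int)) (service_dict : List (Int × Int)) (out : (List (String × List Int)) × (List (String × Int))) : Decidable (Spec_MTP ara_ teslim matrix service_dict out) := by unfold Spec_MTP; infer_instance

-- ===== CLAIM (what is proved, stated in full; the proofs are below) =====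
def Claim_equal_MTP : Prop := ∀ (ara_ : List Int) (teslim : List Int) (matrix : List (List Int)) (service_dict : List (Int × Int)), Dom_MTP ara_ teslim matrix service_dict → Pre_MTP ara_ teslim matrix service_dict → Spec_MTP ara_ teslim matrix service_dict (MTP ara_ teslim matrix service_dict)

-- ===== LEMMAS AND PROOFS =====

theorem pvWitness_ok : Dom_MTP pvWitness_MTP.1 pvWitness_MTP.2.1 pvWitness_MTP.2.2.1 pvWitness_MTP.2.2.2 ∧
    Pre_MTP pvWitness_MTP.1 pvWitness_MTP.2.1 pvWitness_MTP.2.2.1 pvWitness_MTP.2.2.2 := by decide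

-- Dict.modify is insert of the modified value (definitional)
theorem dict_modify_eq {κ ν : Type} [BEq κ] (d : PySem.Dict κ ν) (k : κ) (d0 : ν) (f : ν → ν) :
    d.modify k d0 f = d.insert k (f (d.getD k d0)) := rfl

-- ---- chooseVeh characterisation ----

def chooseInv (d : PySem.Dict String (List Int)) (matrix : List (List Int))
    (sd : PySem.Dict Int Int) (e : Int) : Option String × Option Int → Prop
  | (none, none) => True
  | (some a, some v) => d.contains a = true ∧ v = edgeCost matrix sd (lastP ((d.get? a).getD [])) e
  | _ => False

theorem choose_fold_inv (d : PySem.Dict String (List Int)) (matrix : List (List Int))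
    (sd : PySem.Dict Int Int) (e : Int) :
    ∀ (ks : List String) (s : Option String × Option Int),
      (∀ k ∈ ks, d.contains k = true) → chooseInv d matrix sd e s →
      chooseInv d matrix sd e (ks.foldl
        (fun st veh =>
          let dist := edgeCost matrix sd (lastP ((d.get? veh).getD [])) e
          match st.2 with
          | none => (some veh, some dist)
          | some dv => if dist < dv then (some veh, some dist) else st) s) := by
  intro ks
  induction ks with
  | nil => intro s _ hs; simpa using hs
  | cons k ks ih =>
    intro s hks hs
    simp only [List.foldl_cons]
    apply ih _ (fun x hx => hks x (by simp [hx]))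
    rcases s with ⟨ao, vo⟩
    rcases vo with _ | v
    · rcases ao with _ | a
      · exact ⟨hks k (by simp), rfl⟩
      · exact absurd hs (by simp [chooseInv])
    · rcases ao with _ | a
      · exact absurd hs (by simp [chooseInv])
      · obtain ⟨h1, h2⟩ := hs
        show chooseInv d matrix sd e
          (if edgeCost matrix sd (lastP ((d.get? k).getD [])) e < v
            then (some k, some (edgeCost matrix sd (lastP ((d.get? k).getD [])) e))
            else (some a, some v))
        split_ifs with hlt
        · exact ⟨hks k (by simp), rfl⟩
        · exact ⟨h1, h2⟩

theorem choose_fold_some (d : PySem.Dict String (List Int)) (matrix : List (List Int))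
    (sd : PySem.Dict Int Int) (e : Int) :
    ∀ (ks : List String) (a : String) (v : Int),
      ∃ a' v', (ks.foldl
        (fun st veh =>
          let dist := edgeCost matrix sd (lastP ((d.get? veh).getD [])) e
          match st.2 with
          | none => (some veh, some dist)
          | some dv => if dist < dv then (some veh, some dist) else st) (some a, some v)) = (some a', some v') := by
  intro ks
  induction ks with
  | nil => exact fun a v => ⟨a, v, rfl⟩
  | cons k ks ih =>
    intro a v
    simp only [List.foldl_cons]
    show ∃ a' v', (ks.foldl _
      (if edgeCost matrix sd (lastP ((d.get? k).getD [])) e < v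
        then (some k, some (edgeCost matrix sd (lastP ((d.get? k).getD [])) e))
        else (some a, some v))) = (some a', some v')
    split_ifs with hlt
    · exact ih _ _
    · exact ih _ _

theorem chooseVeh_empty (d : PySem.Dict String (List Int)) (matrix : List (List Int))
    (sd : PySem.Dict Int Int) (e : Int) (h : d.keys = []) :
    chooseVeh d matrix sd e = (none, none) := by
  simp [chooseVeh, h]

theorem chooseVeh_spec (d : PySem.Dict String (List Int)) (matrix : List (List Int))
    (sd : PySem.Dict Int Int) (e : Int) (h : d.keys ≠ []) :
    ∃ a v, chooseVeh d matrix sd e = (some a, some v) ∧ d.contains a = true ∧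
      v = edgeCost matrix sd (lastP ((d.get? a).getD [])) e := by
  have hinv : chooseInv d matrix sd e (chooseVeh d matrix sd e) :=
    choose_fold_inv d matrix sd e d.keys (none, none)
      (fun k hk => (PySem.Dict.contains_iff_mem_keys d k).mpr hk) trivial
  obtain ⟨k, ks, hk⟩ := List.exists_cons_of_ne_nil h
  have hshape : ∃ a v, chooseVeh d matrix sd e = (some a, some v) := by
    unfold chooseVeh
    rw [hk]
    simp only [List.foldl_cons]
    exact choose_fold_some d matrix sd e ks k _
  obtain ⟨a, v, hav⟩ := hshape
  rw [hav] at hinv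
  exact ⟨a, v, hav, hinv.1, hinv.2⟩

-- ---- vehicleAndDistance characterisation ----

theorem vehDist_items (dic : PySem.Dict String (List Int)) (matrix : List (List Int))
    (sd : PySem.Dict Int Int) (hnd : dic.keys.Nodup) :
    (vehicleAndDistance dic matrix sd).items
      = dic.keys.map (fun k => (k, routeSum matrix sd ((dic.get? k).getD []))) := by
  unfold vehicleAndDistance
  rw [PySem.Dict.items_foldl_insert_fresh dic.keys (fun k => k)
      (fun k => routeSum matrix sd ((dic.get? k).getD [])) PySem.Dict.empty
      (fun a _ => PySem.Dict.contains_empty a) (by simpa using hnd)]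
  show PySem.Dict.empty.items ++ _ = _
  rw [show (PySem.Dict.empty : PySem.Dict String Int).items = [] from rfl]
  simp

theorem vehDist_keys (dic : PySem.Dict String (List Int)) (matrix : List (List Int))
    (sd : PySem.Dict Int Int) (hnd : dic.keys.Nodup) :
    (vehicleAndDistance dic matrix sd).keys = dic.keys := by
  show (vehicleAndDistance dic matrix sd).items.map (·.1) = dic.keys
  rw [vehDist_items dic matrix sd hnd, List.map_map]
  exact List.map_id _

-- ---- routeSum lemmas ----

theorem routeSum_singleton (matrix : List (List Int)) (sd : PySem.Dict Int Int) (x : Int) :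
    routeSum matrix sd [x] = 0 := rfl

theorem routeSum_append (matrix : List (List Int)) (sd : PySem.Dict Int Int)
    (r : List Int) (e : Int) (hr : r ≠ []) :
    routeSum matrix sd (r ++ [e]) = routeSum matrix sd r + edgeCost matrix sd (lastP r) e := by
  have hn : 1 ≤ r.length := List.length_pos_iff.mpr hr
  have hcast : ((r ++ [e]).length : Int) - 1 = ((r.length - 1 : Nat) : Int) + 1 := by
    simp; omega
  unfold routeSum
  rw [hcast, PySem.List.pyRange_one_succ_right (by positivity), List.foldl_append,
      show ((r.length - 1 : Nat) : Int) = (r.length : Int) - 1 from by omega]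
  simp only [List.foldl_cons, List.foldl_nil]
  have hpre : ∀ (acc : Int), ∀ i ∈ PySem.List.pyRange 0 ((r.length : Int) - 1),
      acc + edgeCost matrix sd ((PySem.List.pyGet? (r ++ [e]) i).getD 0) ((PySem.List.pyGet? (r ++ [e]) (i + 1)).getD 0)
      = acc + edgeCost matrix sd ((PySem.List.pyGet? r i).getD 0) ((PySem.List.pyGet? r (i + 1)).getD 0) := by
    intro acc i hi
    rw [PySem.List.mem_pyRange_one] at hi
    have h1 : PySem.List.pyGet? (r ++ [e]) i = PySem.List.pyGet? r i := by
      rw [PySem.List.pyGet?_of_nonneg_of_lt _ hi.1 (by simp; omega),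
          PySem.List.pyGet?_of_nonneg_of_lt _ hi.1 (by omega),
          List.getElem?_append_left (by omega)]
    have h2 : PySem.List.pyGet? (r ++ [e]) (i + 1) = PySem.List.pyGet? r (i + 1) := by
      rw [PySem.List.pyGet?_of_nonneg_of_lt _ (by omega) (by simp; omega),
          PySem.List.pyGet?_of_nonneg_of_lt _ (by omega) (by omega),
          List.getElem?_append_left (by omega)]
    rw [h1, h2]
  rw [PySem.List.foldl_congr_mem _ _ _ _ hpre]
  congr 1
  have hlast : PySem.List.pyGet? (r ++ [e]) ((r.length : Int) - 1) = r.getLast? := by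
    rw [PySem.List.pyGet?_of_nonneg_of_lt _ (by omega) (by simp),
        List.getElem?_append_left (by omega), List.getLast?_eq_getElem?,
        show ((r.length : Int) - 1).toNat = r.length - 1 from by omega]
  have hnext : PySem.List.pyGet? (r ++ [e]) (((r.length : Int) - 1) + 1) = some e := by
    have h : ((r.length : Int) - 1) + 1 = ((r.length : Nat) : Int) := by omega
    rw [h, PySem.List.pyGet?_natCast]
    simp
  rw [hlast, hnext]
  simp [lastP, PySem.List.pyGet?_neg_one]

-- ---- vehicleAndDistance under the two update shapes ----

theorem vehDist_insert_singleton (dic : PySem.Dict String (List Int)) (matrix : List (List Int))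
    (sd : PySem.Dict Int Int) (key : String) (x : Int) (hnd : dic.keys.Nodup) :
    vehicleAndDistance (dic.insert key [x]) matrix sd
      = (vehicleAndDistance dic matrix sd).insert key 0 := by
  apply PySem.Dict.ext
  have hnd' : (dic.insert key [x]).keys.Nodup := PySem.Dict.nodup_keys_insert _ _ _ hnd
  rw [vehDist_items _ _ _ hnd']
  by_cases hc : dic.contains key = true
  · have hck : (vehicleAndDistance dic matrix sd).contains key = true := by
      rw [PySem.Dict.contains_iff_mem_keys, vehDist_keys _ _ _ hnd]
      exact (PySem.Dict.contains_iff_mem_keys _ _).mp hc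
    rw [PySem.Dict.items_insert_of_contains _ _ hck, vehDist_items _ _ _ hnd,
        PySem.Dict.keys_insert_of_contains _ _ hc, List.map_map]
    apply List.map_congr_left
    intro k _
    by_cases hk : k = key
    · subst hk
      simp [routeSum_singleton]
    · simp [PySem.Dict.get?_insert, hk]
  · have hc' := eq_false_of_ne_true hc
    have hck : (vehicleAndDistance dic matrix sd).contains key = false := by
      have := PySem.Dict.contains_iff_mem_keys (vehicleAndDistance dic matrix sd) key
      rw [vehDist_keys _ _ _ hnd] at this
      by_contra hx
      exact hc ((PySem.Dict.contains_iff_mem_keys _ _).mpr (this.mp (eq_true_of_ne_false hx)))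
    rw [PySem.Dict.items_insert_of_not_contains _ _ hck, vehDist_items _ _ _ hnd,
        PySem.Dict.keys_insert_of_not_contains _ _ hc', List.map_append]
    congr 1
    · apply List.map_congr_left
      intro k hk
      have hkne : k ≠ key := by
        intro h; subst h
        exact absurd ((PySem.Dict.contains_iff_mem_keys _ _).mpr hk) (by simp [hc'])
      simp [PySem.Dict.get?_insert, hkne]
    · simp [PySem.Dict.get?_insert, routeSum_singleton]

theorem vehDist_extend (d : PySem.Dict String (List Int)) (matrix : List (List Int))
    (sd : PySem.Dict Int Int) (a : String) (e : Int) (hnd : d.keys.Nodup)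
    (hvals : ∀ k r, d.get? k = some r → r ≠ []) (ha : d.contains a = true) :
    vehicleAndDistance (d.insert a (d.getD a [] ++ [e])) matrix sd
      = (vehicleAndDistance d matrix sd).insert a
          (routeSum matrix sd (d.getD a []) + edgeCost matrix sd (lastP (d.getD a [])) e) := by
  apply PySem.Dict.ext
  have hnd' : (d.insert a (d.getD a [] ++ [e])).keys.Nodup := PySem.Dict.nodup_keys_insert _ _ _ hnd
  have hck : (vehicleAndDistance d matrix sd).contains a = true := by
    rw [PySem.Dict.contains_iff_mem_keys, vehDist_keys _ _ _ hnd]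
    exact (PySem.Dict.contains_iff_mem_keys _ _).mp ha
  rw [vehDist_items _ _ _ hnd', PySem.Dict.items_insert_of_contains _ _ hck,
      vehDist_items _ _ _ hnd, PySem.Dict.keys_insert_of_contains _ _ ha, List.map_map]
  apply List.map_congr_left
  intro k _
  by_cases hk : k = a
  · subst hk
    obtain ⟨r, hr⟩ := Option.isSome_iff_exists.mp
      ((PySem.Dict.contains_eq_isSome_get? (d := d) (k := k)).symm.trans ha)
    have hrne : r ≠ [] := hvals _ _ hr
    have hgd : d.getD k [] = r := by rw [PySem.Dict.getD_eq_get?_getD, hr]; rfl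
    simp [hgd, routeSum_append matrix sd r e hrne]
  · simp [PySem.Dict.get?_insert, hk]

-- ---- B's initialisation pass builds (create_veh_dict araç, its zero distances) ----

theorem vehDist_getD (d : PySem.Dict String (List Int)) (matrix : List (List Int))
    (sd : PySem.Dict Int Int) (a : String) (hnd : d.keys.Nodup) (ha : d.contains a = true) :
    (vehicleAndDistance d matrix sd).getD a 0 = routeSum matrix sd ((d.get? a).getD []) := by
  have hmem : (a, routeSum matrix sd ((d.get? a).getD [])) ∈ (vehicleAndDistance d matrix sd).items := by
    rw [vehDist_items _ _ _ hnd]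
    exact List.mem_map_of_mem ((PySem.Dict.contains_iff_mem_keys _ _).mp ha)
  exact PySem.Dict.getD_of_mem_items _ hmem (by
    rw [vehDist_keys _ _ _ hnd]; exact hnd) 0

-- ---- B's initialisation pass builds (create_veh_dict araç, its zero distances) ----

theorem init_inv (matrix : List (List Int)) (sd : PySem.Dict Int Int) :
    ∀ (l : List (Int × Int)) (p : PySem.Dict String (List Int) × PySem.Dict String Int),
      p.1.keys.Nodup → (∀ k r, p.1.get? k = some r → r ≠ []) →
      p.2 = vehicleAndDistance p.1 matrix sd →
      (l.foldl (fun (p : PySem.Dict String (List Int) × PySem.Dict String Int) ie =>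
          (p.1.insert (PySem.Int.toStr (ie.1 + 1)) [ie.2],
           p.2.insert (PySem.Int.toStr (ie.1 + 1)) 0)) p)
        = (l.foldl (fun d ie => d.insert (PySem.Int.toStr (ie.1 + 1)) [ie.2]) p.1,
           vehicleAndDistance (l.foldl (fun d ie => d.insert (PySem.Int.toStr (ie.1 + 1)) [ie.2]) p.1) matrix sd)
      ∧ (l.foldl (fun d ie => d.insert (PySem.Int.toStr (ie.1 + 1)) [ie.2]) p.1).keys.Nodup
      ∧ (∀ k r, (l.foldl (fun d ie => d.insert (PySem.Int.toStr (ie.1 + 1)) [ie.2]) p.1).get? k = some r → r ≠ []) := by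
  intro l
  induction l with
  | nil =>
    intro p hnd hvals hz
    refine ⟨?_, hnd, hvals⟩
    simp only [List.foldl_nil]
    rw [← hz]
  | cons ie l ih =>
    intro p hnd hvals hz
    simp only [List.foldl_cons]
    apply ih
    · exact PySem.Dict.nodup_keys_insert _ _ _ hnd
    · intro k r hkr
      rw [PySem.Dict.get?_insert] at hkr
      by_cases hk : k = PySem.Int.toStr (ie.1 + 1)
      · simp [hk] at hkr; simp [← hkr]
      · exact hvals k r (by simpa [hk] using hkr)
    · show p.2.insert (PySem.Int.toStr (ie.1 + 1)) 0 = _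
      rw [hz, vehDist_insert_singleton _ _ _ _ _ hnd]

-- ---- the main fused loop invariant ----

theorem loop_inv (matrix : List (List Int)) (sd : PySem.Dict Int Int) :
    ∀ (ts : List Int) (d : PySem.Dict String (List Int)) (z : PySem.Dict String Int),
      d.keys.Nodup → (∀ k r, d.get? k = some r → r ≠ []) →
      z = vehicleAndDistance d matrix sd →
      (ts.foldl (fun (p : PySem.Dict String (List Int) × PySem.Dict String Int) e =>
          match chooseVeh p.1 matrix sd e with
          | (some araba, some distance) =>
              (p.1.modify araba [] (fun r => r ++ [e]), p.2.modify araba 0 (fun s => s + distance))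
          | _ => p) (d, z))
        = (ts.foldl (fun d e =>
            match (chooseVeh d matrix sd e).1 with
            | some araba => d.modify araba [] (fun r => r ++ [e])
            | none => d) d,
           vehicleAndDistance (ts.foldl (fun d e =>
            match (chooseVeh d matrix sd e).1 with
            | some araba => d.modify araba [] (fun r => r ++ [e])
            | none => d) d) matrix sd) := by
  intro ts
  induction ts with
  | nil =>
    intro d z hnd hvals hz
    simp only [List.foldl_nil]
    rw [hz]
  | cons e ts ih =>
    intro d z hnd hvals hz
    simp only [List.foldl_cons]
    by_cases hk : d.keys = []
    · rw [chooseVeh_empty d matrix sd e hk]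
      exact ih d z hnd hvals hz
    · obtain ⟨a, v, hav, ha, hv⟩ := chooseVeh_spec d matrix sd e hk
      rw [hav]
      show (ts.foldl _ (d.modify a [] (fun r => r ++ [e]), z.modify a 0 (fun s => s + v))) = _
      rw [dict_modify_eq d, dict_modify_eq z]
      have hgd : d.getD a [] = (d.get? a).getD [] := PySem.Dict.getD_eq_get?_getD _ _ _
      have hz' : z.insert a (z.getD a 0 + v)
          = vehicleAndDistance (d.insert a (d.getD a [] ++ [e])) matrix sd := by
        rw [hz, vehDist_getD d matrix sd a hnd ha,
            vehDist_extend d matrix sd a e hnd hvals ha, hgd, hv]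
      have hnd' : (d.insert a (d.getD a [] ++ [e])).keys.Nodup :=
        PySem.Dict.nodup_keys_insert _ _ _ hnd
      have hvals' : ∀ k r, (d.insert a (d.getD a [] ++ [e])).get? k = some r → r ≠ [] := by
        intro k r hkr
        rw [PySem.Dict.get?_insert] at hkr
        by_cases hka : k = a
        · simp [hka] at hkr; simp [← hkr]
        · exact hvals k r (by simpa [hka] using hkr)
      exact ih _ _ hnd' hvals' hz'

-- ===== VERDICT (by name: the statement is the Claim_ definition above) =====
theorem MTP_spec : Claim_equal_MTP := by
  intro ara_ teslim matrix service_dict _hdom _hpre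
  unfold Spec_MTP MTP MTP_alt
  dsimp only
  have hempty_nd : (PySem.Dict.empty : PySem.Dict String (List Int)).keys.Nodup :=
    PySem.Dict.nodup_keys_empty
  have hinit := init_inv matrix (PySem.Dict.ofList service_dict) (PySem.List.enumerate ara_)
    (PySem.Dict.empty, PySem.Dict.empty) hempty_nd
    (fun k r h => by rw [PySem.Dict.get?_empty] at h; exact absurd h (by simp)) rfl
  have hcd : createVehDict ara_
      = (PySem.List.enumerate ara_).foldl
          (fun d ie => d.insert (PySem.Int.toStr (ie.1 + 1)) [ie.2]) PySem.Dict.empty := rfl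
  rw [hinit.1, hcd]
  rw [loop_inv matrix (PySem.Dict.ofList service_dict) teslim _ _ hinit.2.1 hinit.2.2 rfl]
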